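-- pv_equiv track=rewrite | github.com/YoshiBrightside/Ode-to-my-Failures | ICPC/Repechaje201018/New folder/acm/G.py | maxD
-- ===== SOURCE A (Python) =====
-- def sumN(n):
--     return (n * (n+1) // 2)
--
-- def maxD(x):
--     for d in range(x//2, 0, -1):
--         for n in range(0, x):
--             if x == d * (n+1) + sumN(n):
--                 return d
--             elif x < d * (n+1) + sumN(n):
--                 break
--     return -1
-- ===== SOURCE B (Python) =====
-- def maxD(x):
--     # x = d + (d+1) + ... + (d+n)  <=>  2*x = k*(2*d + k - 1) with k = n+1 terms.
--     # A only accepts starts d <= x//2, which rules out the single-term (k=1) case,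
--     # so we want the largest valid d, i.e. the smallest term count k >= 2.
--     k = 2
--     while k * (k + 1) // 2 <= x:
--         if (2 * x) % k == 0:
--             t = 2 * x // k - k + 1
--             if t % 2 == 0:
--                 return t // 2
--         k += 1
--     return -1
-- ===== Notes on version B (the rewrite author's own statement) =====
-- stated objective: faster
-- what changed: Instead of scanning all starts d from x//2 downward and simulating partial sums for each, B scans term counts k = 2,3,... and solves 2x = k(2d+k-1) for d in O(1) per k, returning at the first (hence largest-d) solution.
import Mathlib
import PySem

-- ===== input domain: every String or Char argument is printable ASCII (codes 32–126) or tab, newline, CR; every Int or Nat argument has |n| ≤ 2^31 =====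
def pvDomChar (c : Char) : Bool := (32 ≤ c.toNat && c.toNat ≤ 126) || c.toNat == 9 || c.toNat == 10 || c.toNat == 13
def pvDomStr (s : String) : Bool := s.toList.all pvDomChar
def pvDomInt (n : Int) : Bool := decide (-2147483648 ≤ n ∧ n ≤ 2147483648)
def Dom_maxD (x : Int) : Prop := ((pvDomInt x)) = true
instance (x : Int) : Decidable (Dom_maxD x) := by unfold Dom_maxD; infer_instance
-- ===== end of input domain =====

-- B replaces A's scan over all starts d (with an inner partial-sum scan) by a scan over
-- term counts k solving 2x = k(2d+k-1) for d in O(1) per k; objective: faster (asymptotic).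


-- ===== PORT A =====
def sumN (n : Int) : Int := PySem.Int.floordiv (n * (n + 1)) 2

-- inner 'for n in range(0, x)' loop: some d = early return, none = break / exhausted
def maxDInner (x d : Int) : List Int → Option Int
  | [] => none
  | n :: ns =>
    if x = d * (n + 1) + sumN n then some d
    else if x < d * (n + 1) + sumN n then none
    else maxDInner x d ns

-- outer 'for d in range(x//2, 0, -1)' loop
def maxDOuter (x : Int) : List Int → Int
  | [] => -1
  | d :: ds =>
    match maxDInner x d (PySem.List.pyRange 0 x 1) with
    | some r => r
    | none => maxDOuter x ds

def maxD (x : Int) : Int :=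
  maxDOuter x (PySem.List.pyRange (PySem.Int.floordiv x 2) 0 (-1))

-- ===== PORT B =====
-- termination fact for the while loop: the guard forces k ≤ x
theorem maxDLoop_guard_le (x k : Int) (h : PySem.Int.floordiv (k * (k + 1)) 2 ≤ x) :
    k ≤ x := by
  rw [PySem.Int.floordiv_eq_ediv_of_pos (by omega : (0:Int) < 2)] at h
  have hnn : 0 ≤ k * (k + 1) := by nlinarith [sq_nonneg (2 * k + 1)]
  have h2 : 2 * k ≤ k * (k + 1) ∨ k ≤ 0 := by
    by_cases hk : 1 ≤ k
    · left; nlinarith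
    · right; omega
  omega

-- while-loop of B, recursing on k
def maxDLoop (x k : Int) : Int :=
  if h : PySem.Int.floordiv (k * (k + 1)) 2 ≤ x then
    if PySem.Int.mod (2 * x) k = 0 then
      if PySem.Int.mod (PySem.Int.floordiv (2 * x) k - k + 1) 2 = 0 then
        PySem.Int.floordiv (PySem.Int.floordiv (2 * x) k - k + 1) 2
      else maxDLoop x (k + 1)
    else maxDLoop x (k + 1)
  else -1
termination_by (x + 1 - k).toNat
decreasing_by
  all_goals
    have := maxDLoop_guard_le x k h
    omega

def maxD_alt (x : Int) : Int := maxDLoop x 2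

-- ===== PRECONDITION & SPEC =====
def Spec_maxD (x : Int) (out : Int) : Prop := out = maxD_alt x
instance (x : Int) (out : Int) : Decidable (Spec_maxD x out) := by unfold Spec_maxD; infer_instance

-- ===== CLAIM (what is proved, stated in full; the proofs are below) =====
def Claim_equal_maxD : Prop := ∀ (x : Int), Dom_maxD x → Spec_maxD x (maxD x)

-- ===== LEMMAS AND PROOFS =====

-- x is a sum of k ≥ 2 consecutive integers starting at d ≥ 1
def GoodK (x k : Int) : Prop := ∃ d : Int, 1 ≤ d ∧ 2 * x = k * (2 * d + k - 1)

theorem two_sumN (n : Int) : 2 * sumN n = n * (n + 1) := by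
  have he : (2:Int) ∣ n * (n + 1) := (Int.even_mul_succ_self n).two_dvd
  unfold sumN
  rw [PySem.Int.floordiv_eq_ediv_of_pos (by omega : (0:Int) < 2)]
  omega

-- A's inner check x = d*(n+1) + sumN n, doubled
theorem check_iff (x d n : Int) :
    x = d * (n + 1) + sumN n ↔ 2 * x = 2 * d * (n + 1) + n * (n + 1) := by
  have := two_sumN n
  constructor <;> intro h <;> nlinarith [h, this]

-- the inner loop returns some d iff a solution with index ≥ m exists (d ≥ 1, m ≥ 0)
theorem inner_some_iff (x d : Int) (hd : 1 ≤ d) :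
    ∀ m : Int, 0 ≤ m →
      (maxDInner x d (PySem.List.pyRange m x 1) = some d ↔
        ∃ n, m ≤ n ∧ x = d * (n + 1) + sumN n) := by
  intro m hm
  by_cases hlt : m < x
  · rw [PySem.List.pyRange_one_cons hlt]
    unfold maxDInner
    by_cases heq : x = d * (m + 1) + sumN m
    · simp only [if_pos heq]
      exact iff_of_true trivial ⟨m, le_refl m, heq⟩
    · simp only [if_neg heq]
      by_cases hbr : x < d * (m + 1) + sumN m
      · simp only [if_pos hbr]
        constructor
        · intro h; exact absurd h (by simp)
        · rintro ⟨n, hn, hx⟩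
          exfalso
          rw [check_iff] at hx
          have hbr2 : 2 * x < 2 * (d * (m + 1)) + m * (m + 1) := by
            have := two_sumN m; nlinarith [hbr]
          -- monotonicity: n ≥ m ≥ 0 so the doubled sum at n is ≥ at m
          nlinarith [hx, hbr2, hn, hm, hd]
      · simp only [if_neg hbr]
        rw [inner_some_iff x d hd (m + 1) (by omega)]
        constructor
        · rintro ⟨n, hn, hx⟩; exact ⟨n, by omega, hx⟩
        · rintro ⟨n, hn, hx⟩
          refine ⟨n, ?_, hx⟩
          by_cases h : m < n
          · omega
          · have hnm : n = m := by omega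
            subst hnm
            exact absurd hx heq
  · rw [PySem.List.pyRange_one_eq_nil (by omega)]
    unfold maxDInner
    constructor
    · intro h; exact absurd h (by simp)
    · rintro ⟨n, hn, hx⟩
      exfalso
      rw [check_iff] at hx
      -- x = sum ≥ n+1 > n ≥ m ≥ x : impossible
      nlinarith [hx, hd, hn, hm, hlt]
termination_by m => (x - m).toNat
decreasing_by omega

theorem inner_cases (x d : Int) :
    ∀ ns : List Int, maxDInner x d ns = some d ∨ maxDInner x d ns = none := by
  intro ns
  induction ns with
  | nil => right; rfl
  | cons n ns ih =>
    unfold maxDInner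
    split_ifs with h1 h2
    · left; rfl
    · right; rfl
    · exact ih

-- solutions of A's inner test, as a predicate on the start d
def SolD (x d : Int) : Prop := ∃ n, 0 ≤ n ∧ x = d * (n + 1) + sumN n

theorem inner_none_of_not_sol (x d : Int) (hd : 1 ≤ d) (h : ¬ SolD x d) :
    maxDInner x d (PySem.List.pyRange 0 x 1) = none := by
  rcases inner_cases x d (PySem.List.pyRange 0 x 1) with hs | hn
  · exfalso
    exact h ((inner_some_iff x d hd 0 le_rfl).mp hs)
  · exact hn

theorem outer_none (x : Int) :
    ∀ c : Int, (∀ d, 1 ≤ d → d ≤ c → ¬ SolD x d) →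
      maxDOuter x (PySem.List.pyRange c 0 (-1)) = -1 := by
  intro c hno
  by_cases hc : 0 < c
  · rw [PySem.List.pyRange_neg_one_cons hc]
    unfold maxDOuter
    rw [inner_none_of_not_sol x c (by omega) (hno c (by omega) le_rfl)]
    exact outer_none x (c - 1) (fun d h1 h2 => hno d h1 (by omega))
  · rw [PySem.List.pyRange_neg_one_eq_nil (by omega)]
    rfl
termination_by c => c.toNat
decreasing_by omega

theorem outer_some (x : Int) (d0 : Int) (hd0 : 1 ≤ d0) (hsol : SolD x d0) :
    ∀ c : Int, d0 ≤ c → (∀ d, d0 < d → d ≤ c → ¬ SolD x d) →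
      maxDOuter x (PySem.List.pyRange c 0 (-1)) = d0 := by
  intro c hc hno
  have hcpos : 0 < c := by omega
  rw [PySem.List.pyRange_neg_one_cons hcpos]
  unfold maxDOuter
  rcases eq_or_lt_of_le hc with heq | hlt
  · subst heq
    rcases hsol with ⟨n, hn, hx⟩
    have := (inner_some_iff x d0 hd0 0 le_rfl).mpr ⟨n, hn, hx⟩
    rw [this]
  · rw [inner_none_of_not_sol x c (by omega) (hno c hlt le_rfl)]
    exact outer_some x d0 hd0 hsol (c - 1) (by omega) (fun d h1 h2 => hno d h1 (by omega))
termination_by c => c.toNat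
decreasing_by omega

-- SolD restricted to d ≤ x//2 coincides with a GoodK solution
theorem floordiv_two_bounds (x : Int) :
    2 * PySem.Int.floordiv x 2 ≤ x ∧ x ≤ 2 * PySem.Int.floordiv x 2 + 1 := by
  rw [PySem.Int.floordiv_eq_ediv_of_pos (by omega : (0:Int) < 2)]
  omega

theorem good_of_sol (x d : Int) (hd : 1 ≤ d) (hle : d ≤ PySem.Int.floordiv x 2)
    (hs : SolD x d) : ∃ k, 2 ≤ k ∧ 2 * x = k * (2 * d + k - 1) := by
  rcases hs with ⟨n, hn, hx⟩
  rw [check_iff] at hx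
  refine ⟨n + 1, ?_, by ring_nf; ring_nf at hx; linarith [hx]⟩
  -- rule out n = 0 (single term x = d): then x = d ≤ x//2, impossible for x ≥ 1
  by_cases h : 0 < n
  · omega
  · exfalso
    have hn0 : n = 0 := by omega
    subst hn0
    have hxd : x = d := by nlinarith [hx]
    have := floordiv_two_bounds x
    omega

theorem sol_of_good (x d k : Int) (_hd : 1 ≤ d) (hk : 2 ≤ k)
    (hx : 2 * x = k * (2 * d + k - 1)) : SolD x d := by
  refine ⟨k - 1, by omega, ?_⟩
  rw [check_iff]
  ring_nf; ring_nf at hx; linarith [hx]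

-- guard of B, divisibility-free form
theorem guard_iff (x k : Int) :
    PySem.Int.floordiv (k * (k + 1)) 2 ≤ x ↔ k * (k + 1) ≤ 2 * x := by
  rw [PySem.Int.floordiv_eq_ediv_of_pos (by omega : (0:Int) < 2)]
  have he : (2:Int) ∣ k * (k + 1) := (Int.even_mul_succ_self k).two_dvd
  omega

-- B's in-loop test at k ≥ 2 (under the guard) holds exactly when GoodK x k,
-- and then it returns the d of that k
theorem bstep_of_good (x k d : Int) (hk : 2 ≤ k) (_hd : 1 ≤ d)
    (hx : 2 * x = k * (2 * d + k - 1)) :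
    PySem.Int.mod (2 * x) k = 0 ∧
    PySem.Int.floordiv (2 * x) k - k + 1 = 2 * d := by
  have hkpos : (0:Int) < k := by omega
  constructor
  · rw [PySem.Int.mod_eq_emod_of_pos hkpos, hx]
    simp [Int.mul_emod_right]
  · rw [PySem.Int.floordiv_eq_ediv_of_pos hkpos, hx]
    rw [Int.mul_ediv_cancel_left _ (by omega : k ≠ 0)]
    ring

theorem good_of_bstep (x k : Int) (hk : 2 ≤ k)
    (hg : PySem.Int.floordiv (k * (k + 1)) 2 ≤ x)
    (hm : PySem.Int.mod (2 * x) k = 0)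
    (hp : PySem.Int.mod (PySem.Int.floordiv (2 * x) k - k + 1) 2 = 0) :
    ∃ d, 1 ≤ d ∧ 2 * x = k * (2 * d + k - 1) ∧
      PySem.Int.floordiv (PySem.Int.floordiv (2 * x) k - k + 1) 2 = d := by
  have hkpos : (0:Int) < k := by omega
  rw [PySem.Int.mod_eq_emod_of_pos hkpos] at hm
  rw [PySem.Int.floordiv_eq_ediv_of_pos hkpos] at hp ⊢
  rw [PySem.Int.mod_eq_emod_of_pos (by omega : (0:Int) < 2)] at hp
  rw [PySem.Int.floordiv_eq_ediv_of_pos (by omega : (0:Int) < 2)]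
  set q := 2 * x / k with hq
  have hqk : 2 * x = k * q := by
    have h : 2 * x / k * k = 2 * x := Int.ediv_mul_cancel (Int.dvd_of_emod_eq_zero hm)
    rw [hq, mul_comm k]
    exact h.symm
  have hguard : k * (k + 1) ≤ 2 * x := (guard_iff x k).mp hg
  have hqge : k + 1 ≤ q := by nlinarith [hqk, hguard]
  set t := q - k + 1 with ht
  have hte : (2:Int) ∣ t := by omega
  refine ⟨t / 2, by omega, ?_, rfl⟩
  have h2 : 2 * (t / 2) = t := by omega
  rw [h2]
  have ht2 : t + k - 1 = q := by omega
  rw [ht2]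
  exact hqk

-- B's loop scans k upward: none below k0 works, k0 works → returns its d
theorem bloop_some (x k0 d0 : Int) (hk0 : 2 ≤ k0) (hd0 : 1 ≤ d0)
    (hx : 2 * x = k0 * (2 * d0 + k0 - 1)) :
    ∀ k : Int, 2 ≤ k → k ≤ k0 → (∀ j, k ≤ j → j < k0 → ¬ GoodK x j) →
      maxDLoop x k = d0 := by
  intro k hk2 hkle hno
  have hguard0 : k0 * (k0 + 1) ≤ 2 * x := by nlinarith [hx]
  have hguard : PySem.Int.floordiv (k * (k + 1)) 2 ≤ x := by
    rw [guard_iff]; nlinarith [hguard0]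
  rcases eq_or_lt_of_le hkle with heq | hlt
  · subst heq
    obtain ⟨hm, hfl⟩ := bstep_of_good x k d0 hk2 hd0 hx
    unfold maxDLoop
    rw [dif_pos hguard, if_pos hm,
      if_pos (by rw [hfl, PySem.Int.mod_eq_emod_of_pos (by omega : (0:Int) < 2)]; omega)]
    rw [hfl, PySem.Int.floordiv_eq_ediv_of_pos (by omega : (0:Int) < 2)]
    omega
  · unfold maxDLoop
    rw [dif_pos hguard]
    have hnotk : ¬ GoodK x k := hno k le_rfl hlt
    have hrec : maxDLoop x (k + 1) = d0 :=
      bloop_some x k0 d0 hk0 hd0 hx (k + 1) (by omega) (by omega)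
        (fun j h1 h2 => hno j (by omega) h2)
    split_ifs with hm hp
    · exfalso
      obtain ⟨d, hd, hxd, _⟩ := good_of_bstep x k hk2 hguard hm hp
      exact hnotk ⟨d, hd, hxd⟩
    · exact hrec
    · exact hrec
termination_by k => (k0 - k).toNat
decreasing_by omega

theorem bloop_none (x : Int) (hno : ∀ j, 2 ≤ j → ¬ GoodK x j) :
    ∀ k : Int, 2 ≤ k → maxDLoop x k = -1 := by
  intro k hk
  unfold maxDLoop
  split_ifs with hg hm hp
  · exfalso
    obtain ⟨d, hd, hxd, _⟩ := good_of_bstep x k hk hg hm hp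
    exact hno k hk ⟨d, hd, hxd⟩
  · exact bloop_none x hno (k + 1) (by omega)
  · exact bloop_none x hno (k + 1) (by omega)
  · rfl
termination_by k => (x + 1 - k).toNat
decreasing_by
  all_goals have := maxDLoop_guard_le x k hg; omega

-- valid pairs are strictly antitone: smaller k ↔ larger d
theorem pairs_antitone (x k1 d1 k2 d2 : Int) (hk1 : 2 ≤ k1) (hk2 : 2 ≤ k2)
    (hd1 : 1 ≤ d1) (hd2 : 1 ≤ d2)
    (h1 : 2 * x = k1 * (2 * d1 + k1 - 1)) (h2 : 2 * x = k2 * (2 * d2 + k2 - 1))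
    (hlt : k1 < k2) : d2 < d1 := by
  by_contra hle
  push_neg at hle
  nlinarith [h1, h2]

-- per k, d is unique
theorem d_unique (x k d d' : Int) (hk : 2 ≤ k)
    (h : 2 * x = k * (2 * d + k - 1)) (h' : 2 * x = k * (2 * d' + k - 1)) : d = d' := by
  nlinarith [h, h']

-- ===== VERDICT (by name: the statement is the Claim_ definition above) =====
theorem maxD_spec : Claim_equal_maxD := by
  intro x _
  unfold Spec_maxD maxD maxD_alt
  by_cases hex : ∃ k, 2 ≤ k ∧ GoodK x k
  · -- take the minimal such k (as a Nat, 2 ≤ k so k.toNat works)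
    obtain ⟨k, hk2, hgk⟩ := hex
    have hexN : ∃ m : ℕ, 2 ≤ (m : Int) ∧ GoodK x (m : Int) := by
      refine ⟨k.toNat, ?_, ?_⟩ <;> rw [Int.toNat_of_nonneg (by omega)] <;> assumption
    classical
    obtain ⟨hm02, hm0g⟩ := Nat.find_spec hexN
    have hm0min : ∀ j : ℕ, j < Nat.find hexN → ¬ (2 ≤ (j:Int) ∧ GoodK x (j:Int)) :=
      fun j hj => Nat.find_min hexN hj
    obtain ⟨d0, hd0, hx0⟩ := hm0g
    set k0 : Int := ((Nat.find hexN : ℕ) : Int) with hk0def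
    have hmin : ∀ j, 2 ≤ j → j < k0 → ¬ GoodK x j := by
      intro j hj2 hjlt hgj
      have hj' : ¬ (2 ≤ ((j.toNat : Int)) ∧ GoodK x ((j.toNat : Int))) := by
        apply hm0min
        omega
      rw [Int.toNat_of_nonneg (by omega)] at hj'
      exact hj' ⟨hj2, hgj⟩
    -- B side
    have hB : maxDLoop x 2 = d0 :=
      bloop_some x k0 d0 hm02 hd0 hx0 2 le_rfl hm02 (fun j h1 h2 => hmin j h1 h2)
    rw [hB]
    -- A side: d0 is a solution, nothing bigger up to x//2 is
    have hsol : SolD x d0 := sol_of_good x d0 k0 hd0 hm02 hx0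
    have hdle : d0 ≤ PySem.Int.floordiv x 2 := by
      have := floordiv_two_bounds x
      nlinarith [hx0]
    apply outer_some x d0 hd0 hsol (PySem.Int.floordiv x 2) hdle
    intro d hdlt hdc hsd
    obtain ⟨k', hk'2, hx'⟩ := good_of_sol x d (by omega) hdc hsd
    rcases lt_trichotomy k' k0 with h | h | h
    · exact hmin k' hk'2 h ⟨d, by omega, hx'⟩
    · rw [h] at hx'
      have := d_unique x k0 d0 d hm02 hx0 hx'
      omega
    · have := pairs_antitone x k0 d0 k' d hm02 hk'2 hd0 (by omega) hx0 hx' h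
      omega
  · -- no solution at all
    push_neg at hex
    have hB : maxDLoop x 2 = -1 :=
      bloop_none x (fun j hj hg => hex j hj hg) 2 le_rfl
    rw [hB]
    apply outer_none
    intro d hd1 hdc hsd
    obtain ⟨k', hk'2, hx'⟩ := good_of_sol x d hd1 hdc hsd
    exact hex k' hk'2 ⟨d, hd1, hx'⟩
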